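-- pv_equiv track=rewrite | github.com/nownabe/competitive_programming | AtCoder/ABC195D.py | solve
-- ===== SOURCE A (Python) =====
-- def solve(items, boxes, ql, qr):
--     items = sorted(items)
--     boxes = sorted(boxes[:ql-1] + boxes[qr:])
--
--     dp = [[-1] * (len(boxes) + 1) for _ in range(len(items))]
--
--     def rec(i, j):
--         if i >= len(items) or j >= len(boxes):
--             return 0
--
--         if dp[i][j] != -1:
--             return dp[i][j]
--
--         w, v = items[i]
--
--         box = None
--         for b in range(len(boxes[j:])):
--             if boxes[j + b] >= w:
--                 box = j + b
--                 break
--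
--         if box is None:
--             dp[i][j] = 0
--         else:
--             dp[i][j] = max(rec(i + 1, j), rec(i + 1, box + 1) + v)
--
--         return dp[i][j]
--
--     return rec(0, 0)
-- ===== SOURCE B (Python) =====
-- def solve(items, boxes, ql, qr):
--     items = sorted(items)
--     boxes = sorted(boxes[:ql-1] + boxes[qr:])
--     n, m = len(items), len(boxes)
--     # for item i the first fitting box at or after j is position max(j, c[i]), where
--     # c[i] = number of boxes below its weight; weights are sorted, so one merge pass gives all c[i]
--     c = []
--     p = 0
--     for w, _ in items:
--         while p < m and boxes[p] < w:
--             p += 1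
--         c.append(p)
--     # forward: per level, the reachable box positions that still have a fitting box
--     # (a position with no fitting box contributes 0 and is dropped)
--     levels = [{0}]
--     for ci in c:
--         nxt = set()
--         for j in levels[-1]:
--             k = j if j > ci else ci
--             if k < m:
--                 nxt.add(j)
--                 nxt.add(k + 1)
--         levels.append(nxt)
--     # backward: DP values on those states only; a missing state is worth 0
--     f = {}
--     for (w, v), ci, J in reversed(list(zip(items, c, levels))):
--         f = {j: (0 if (j if j > ci else ci) >= m
--                  else max(f.get(j, 0), f.get((j if j > ci else ci) + 1, 0) + v))
--              for j in J}
--     return f.get(0, 0)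
-- ===== Notes on version B (the rewrite author's own statement) =====
-- stated objective: faster
-- what changed: Replaces the memoized top-down recursion over a preallocated n x (m+1) table with a per-cell linear scan (on a fresh list slice) by an explicit reachable-state DP: one merge pass over the two sorted lists yields each item's count of too-small boxes, a forward pass collects the reachable box positions per level, and a backward pass evaluates the recurrence only on those states with O(1) lookups.
import Mathlib
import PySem

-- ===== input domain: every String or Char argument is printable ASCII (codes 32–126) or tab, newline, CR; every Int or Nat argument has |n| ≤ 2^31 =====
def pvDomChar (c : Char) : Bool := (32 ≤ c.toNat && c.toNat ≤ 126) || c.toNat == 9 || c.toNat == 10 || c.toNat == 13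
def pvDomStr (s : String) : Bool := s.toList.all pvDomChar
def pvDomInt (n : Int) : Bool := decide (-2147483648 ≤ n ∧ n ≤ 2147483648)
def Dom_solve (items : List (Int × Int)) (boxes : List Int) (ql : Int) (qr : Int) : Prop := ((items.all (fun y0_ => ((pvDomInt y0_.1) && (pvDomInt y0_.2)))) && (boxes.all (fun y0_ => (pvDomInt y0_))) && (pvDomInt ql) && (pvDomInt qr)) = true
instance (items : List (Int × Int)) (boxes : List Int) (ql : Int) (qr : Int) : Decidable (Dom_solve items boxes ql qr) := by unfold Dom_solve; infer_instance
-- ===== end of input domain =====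

-- B replaces A's memoized recursion (full n x (m+1) table, per-cell linear scan with a list
-- slice) by an explicit reachable-state DP: a merge pass gives each item's count of too-small
-- boxes, a forward pass collects the reachable box positions per level, a backward pass
-- evaluates the recurrence on those states only; measured faster.


-- ===== PORT A =====
-- dp[i][j] read with default -1 / write; accesses are always in range in A, so getD/set is exact
def pvGet2 (dp : List (List Int)) (i j : Nat) : Int := (dp.getD i []).getD j (-1)

def pvSet2 (dp : List (List Int)) (i j : Nat) (x : Int) : List (List Int) :=
  dp.set i ((dp.getD i []).set j x)

-- A's inner loop: first index b ≥ j with boxes[b] ≥ w (scan over boxes[j:] with break)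
def pvScanBox (boxesS : List Int) (w : Int) (j : Nat) : Option Nat :=
  ((boxesS.drop j).findIdx? (fun x => decide (w ≤ x))).map (fun b => j + b)

def pvRec (itemsS : List (Int × Int)) (boxesS : List Int) (i j : Nat)
    (dp : List (List Int)) : Int × List (List Int) :=
  if h : i < itemsS.length ∧ j < boxesS.length then
    if pvGet2 dp i j ≠ -1 then (pvGet2 dp i j, dp)
    else
      let wv := itemsS.getD i (0, 0)
      match pvScanBox boxesS wv.1 j with
      | none =>
          let dp' := pvSet2 dp i j 0
          (pvGet2 dp' i j, dp')
      | some box =>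
          let r1 := pvRec itemsS boxesS (i + 1) j dp
          let r2 := pvRec itemsS boxesS (i + 1) (box + 1) r1.2
          let dp' := pvSet2 r2.2 i j (max r1.1 (r2.1 + wv.2))
          (pvGet2 dp' i j, dp')
  else (0, dp)
termination_by itemsS.length - i
decreasing_by all_goals omega

def solve (items : List (Int × Int)) (boxes : List Int) (ql : Int) (qr : Int) : Int :=
  let itemsS := PySem.List.sorted2 items Prod.fst Prod.snd
  let boxesS := PySem.List.sorted
    (PySem.List.slice boxes none (some (ql - 1)) ++ PySem.List.slice boxes (some qr) none)
    (fun x => x) false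
  let dp := List.replicate itemsS.length (List.replicate (boxesS.length + 1) (-1))
  (pvRec itemsS boxesS 0 0 dp).1

-- ===== PORT B =====
-- while p < m and boxes[p] < w: p += 1   (in-range read, hence getD is exact)
def pvAdvance (boxesS : List Int) (w : Int) (p : Nat) : Nat :=
  if h : p < boxesS.length ∧ boxesS.getD p 0 < w then pvAdvance boxesS w (p + 1) else p
termination_by boxesS.length - p
decreasing_by omega

-- c = []; p = 0; for w, _ in items: advance p; c.append(p)
def pvCs (itemsS : List (Int × Int)) (boxesS : List Int) : List Nat :=
  (itemsS.foldl (fun st wv => (pvAdvance boxesS wv.1 st.1, st.2 ++ [pvAdvance boxesS wv.1 st.1]))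
    (0, ([] : List Nat))).2

-- nxt = set(); for j in J: k = max(j, ci); if k < m: nxt.add(j); nxt.add(k + 1)
def pvStepSet (m : Nat) (J : List Nat) (ci : Nat) : List Nat :=
  J.foldl (fun nxt j =>
      if max j ci < m then PySem.Set.add (PySem.Set.add nxt j) (max j ci + 1) else nxt)
    ([] : List Nat)

-- levels = [{0}]; for ci in c: levels.append(step(levels[-1], ci))
def pvLevels (m : Nat) (J : List Nat) : List Nat → List (List Nat)
  | [] => [J]
  | ci :: rest => J :: pvLevels m (pvStepSet m J ci) rest

-- f = {j: (0 if k >= m else max(f.get(j, 0), f.get(k + 1, 0) + v)) for j in J}, k = max(j, ci)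
def pvBackStep (m : Nat) (f : PySem.Dict Nat Int) (t : (Int × Int) × Nat × List Nat) :
    PySem.Dict Nat Int :=
  t.2.2.foldl (fun g j =>
      g.insert j (if m ≤ max j t.2.1 then 0
        else max (f.getD j 0) (f.getD (max j t.2.1 + 1) 0 + t.1.2)))
    PySem.Dict.empty

def solve_alt (items : List (Int × Int)) (boxes : List Int) (ql : Int) (qr : Int) : Int :=
  let itemsS := PySem.List.sorted2 items Prod.fst Prod.snd
  let boxesS := PySem.List.sorted
    (PySem.List.slice boxes none (some (ql - 1)) ++ PySem.List.slice boxes (some qr) none)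
    (fun x => x) false
  let m := boxesS.length
  let cs := pvCs itemsS boxesS
  let lvls := pvLevels m [0] cs
  -- f = {}; for (w, v), ci, J in reversed(list(zip(items, c, levels))): f = {...}
  let f := (List.zip itemsS (List.zip cs lvls)).foldr
    (fun t f => pvBackStep m f t) PySem.Dict.empty
  f.getD 0 0

-- ===== PRECONDITION & SPEC =====
def Spec_solve (items : List (Int × Int)) (boxes : List Int) (ql : Int) (qr : Int) (out : Int) : Prop := out = solve_alt items boxes ql qr
instance (items : List (Int × Int)) (boxes : List Int) (ql : Int) (qr : Int) (out : Int) : Decidable (Spec_solve items boxes ql qr out) := by unfold Spec_solve; infer_instance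

-- ===== CLAIM (what is proved, stated in full; the proofs are below) =====
def Claim_equal_solve : Prop := ∀ (items : List (Int × Int)) (boxes : List Int) (ql : Int) (qr : Int), Dom_solve items boxes ql qr → Spec_solve items boxes ql qr (solve items boxes ql qr)

-- ===== LEMMAS AND PROOFS =====

-- the common DP recurrence, as a pure function of (i, j)
def pvF (itemsS : List (Int × Int)) (boxesS : List Int) (i j : Nat) : Int :=
  if h : i < itemsS.length ∧ j < boxesS.length then
    let wv := itemsS.getD i (0, 0)
    match pvScanBox boxesS wv.1 j with
    | none => 0
    | some box => max (pvF itemsS boxesS (i + 1) j) (pvF itemsS boxesS (i + 1) (box + 1) + wv.2)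
  else 0
termination_by itemsS.length - i
decreasing_by all_goals omega

theorem pvF_of_ge (itemsS : List (Int × Int)) (boxesS : List Int) (i j : Nat)
    (h : ¬ (i < itemsS.length ∧ j < boxesS.length)) : pvF itemsS boxesS i j = 0 := by
  rw [pvF]; simp [h]


-- ---- sorted-scan characterisation: A's linear scan lands on max j c, c = #boxes < w ----

-- ---- sorted-scan characterisation: A's linear scan lands on max j c, c = #boxes < w ----

theorem pv_findIdx_sorted (w : Int) (l : List Int) (hl : l.Pairwise (· ≤ ·)) :
    l.findIdx? (fun x => decide (w ≤ x)) =
      if l.countP (fun b => decide (b < w)) < l.length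
      then some (l.countP (fun b => decide (b < w))) else none := by
  induction l with
  | nil => simp
  | cons a t ih =>
    rcases List.pairwise_cons.mp hl with ⟨ha, ht⟩
    by_cases hw : w ≤ a
    · have hct : t.countP (fun b => decide (b < w)) = 0 := by
        rw [List.countP_eq_zero]
        intro x hx
        simp only [decide_eq_true_eq]
        exact not_lt.mpr (le_trans hw (ha x hx))
      simp [List.findIdx?_cons, hw, hct, not_lt.mpr hw]
    · have haw : a < w := lt_of_not_ge hw
      rw [List.findIdx?_cons]
      simp only [decide_eq_true_eq, if_neg hw]
      rw [ih ht]
      simp only [List.countP_cons, List.length_cons, decide_eq_true_eq, if_pos haw]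
      by_cases hc : t.countP (fun b => decide (b < w)) < t.length <;> simp [hc]

theorem pv_countP_drop (w : Int) (l : List Int) (hl : l.Pairwise (· ≤ ·)) (j : Nat) :
    (l.drop j).countP (fun b => decide (b < w)) = l.countP (fun b => decide (b < w)) - j := by
  induction l generalizing j with
  | nil => simp
  | cons a t ih =>
    rcases List.pairwise_cons.mp hl with ⟨ha, ht⟩
    cases j with
    | zero => simp
    | succ j =>
      rw [List.drop_succ_cons, ih ht j, List.countP_cons]
      by_cases haw : a < w
      · simp [haw]
      · have hct : t.countP (fun b => decide (b < w)) = 0 := by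
          rw [List.countP_eq_zero]
          intro x hx
          simp only [decide_eq_true_eq]
          exact fun hxw => haw (lt_of_le_of_lt (ha x hx) hxw)
        simp [haw, hct]

theorem pv_scan_sorted (w : Int) (l : List Int) (hl : l.Pairwise (· ≤ ·)) (j : Nat) :
    pvScanBox l w j =
      if max j (l.countP (fun b => decide (b < w))) < l.length
      then some (max j (l.countP (fun b => decide (b < w)))) else none := by
  unfold pvScanBox
  have hd : (l.drop j).Pairwise (· ≤ ·) := hl.sublist (List.drop_sublist j l)
  rw [pv_findIdx_sorted w _ hd, pv_countP_drop w l hl j]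
  have hle := List.countP_le_length (p := fun b => decide (b < w)) (l := l)
  have hlen : (l.drop j).length = l.length - j := List.length_drop
  by_cases hc : l.countP (fun b => decide (b < w)) - j < l.length - j
  · rw [if_pos (by rw [hlen]; exact hc), Option.map_some, if_pos (by omega)]
    exact congrArg some (by omega)
  · rw [if_neg (by rw [hlen]; exact hc), Option.map_none, if_neg (by omega)]

-- ---- dp-table lemmas ----

theorem pv_get2_set2 (dp : List (List Int)) (i j : Nat) (x : Int) (i' j' : Nat)
    (hi : i < dp.length) (hj : j < (dp.getD i []).length) :
    pvGet2 (pvSet2 dp i j x) i' j' =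
      if i' = i ∧ j' = j then x else pvGet2 dp i' j' := by
  unfold pvGet2 pvSet2
  simp only [List.getD_eq_getElem?_getD] at hj ⊢
  by_cases hii : i' = i
  · subst hii
    rw [List.getElem?_set_self hi, Option.getD_some]
    by_cases hjj : j' = j
    · subst hjj
      rw [List.getElem?_set_self hj, Option.getD_some]
      simp
    · rw [List.getElem?_set_ne (fun h => hjj h.symm)]
      simp [hjj]
  · rw [List.getElem?_set_ne (fun h => hii h.symm)]
    simp [hii]

theorem pv_len_set2 (dp : List (List Int)) (i j : Nat) (x : Int) :
    (pvSet2 dp i j x).length = dp.length := by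
  unfold pvSet2; simp

theorem pv_row_set2 (dp : List (List Int)) (i j : Nat) (x : Int) (i' : Nat) :
    ((pvSet2 dp i j x).getD i' []).length = (dp.getD i' []).length := by
  unfold pvSet2
  simp only [List.getD_eq_getElem?_getD]
  by_cases hii : i' = i
  · subst hii
    by_cases hi : i' < dp.length
    · rw [List.getElem?_set_self hi, Option.getD_some]
      simp
    · rw [List.set_eq_of_length_le (by omega)]
  · rw [List.getElem?_set_ne (fun h => hii h.symm)]

theorem pv_get2_replicate (n m1 i j : Nat) :
    pvGet2 (List.replicate n (List.replicate m1 (-1))) i j = -1 := by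
  unfold pvGet2
  simp only [List.getD_eq_getElem?_getD, List.getElem?_replicate]
  split_ifs <;> simp

theorem pv_row_replicate (n m1 i : Nat) (hi : i < n) :
    ((List.replicate n (List.replicate m1 (-1))).getD i []).length = m1 := by
  simp only [List.getD_eq_getElem?_getD, List.getElem?_replicate, if_pos hi,
    Option.getD_some, List.length_replicate]

-- ---- A's memoized recursion computes pvF ----

def pvShape (dp : List (List Int)) (n m1 : Nat) : Prop :=
  dp.length = n ∧ ∀ i, i < n → (dp.getD i []).length = m1

def pvInv (itemsS : List (Int × Int)) (boxesS : List Int) (dp : List (List Int)) : Prop :=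
  ∀ i j, pvGet2 dp i j = -1 ∨ pvGet2 dp i j = pvF itemsS boxesS i j

theorem pv_rec_main (itemsS : List (Int × Int)) (boxesS : List Int) :
    ∀ (k i j : Nat) (dp : List (List Int)), itemsS.length ≤ i + k →
      pvShape dp itemsS.length (boxesS.length + 1) →
      pvInv itemsS boxesS dp →
      (pvRec itemsS boxesS i j dp).1 = pvF itemsS boxesS i j ∧
      pvShape (pvRec itemsS boxesS i j dp).2 itemsS.length (boxesS.length + 1) ∧
      pvInv itemsS boxesS (pvRec itemsS boxesS i j dp).2 := by
  intro k
  induction k with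
  | zero =>
    intro i j dp hk hs hv
    have h : ¬ (i < itemsS.length ∧ j < boxesS.length) := by omega
    rw [pvRec, dif_neg h, pvF, dif_neg h]
    exact ⟨rfl, hs, hv⟩
  | succ k ih =>
    intro i j dp hk hs hv
    by_cases h : i < itemsS.length ∧ j < boxesS.length
    · rw [pvRec, dif_pos h]
      by_cases hm : pvGet2 dp i j ≠ -1
      · rw [if_pos hm]
        rcases hv i j with hv1 | hv1
        · exact absurd hv1 hm
        · exact ⟨hv1, hs, hv⟩
      · rw [if_neg hm]
        dsimp only
        split
        next hscan =>
          have hval : pvF itemsS boxesS i j = 0 := by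
            rw [pvF, dif_pos h]
            simp only [hscan]
          have hwrite := fun i' j' => pv_get2_set2 dp i j 0 i' j'
            (by rw [hs.1]; exact h.1) (by rw [hs.2 i h.1]; omega)
          refine ⟨?_, ⟨by rw [pv_len_set2, hs.1], fun i' hi' => by rw [pv_row_set2]; exact hs.2 i' hi'⟩, ?_⟩
          · rw [hwrite i j, if_pos ⟨rfl, rfl⟩, hval]
          · intro i' j'
            rw [hwrite i' j']
            split_ifs with hij
            · right; rw [hij.1, hij.2, hval]
            · exact hv i' j'
        next box hscan =>
          obtain ⟨e1, s1, v1⟩ := ih (i + 1) j dp (by omega) hs hv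
          obtain ⟨e2, s2, v2⟩ :=
            ih (i + 1) (box + 1) (pvRec itemsS boxesS (i + 1) j dp).2 (by omega) s1 v1
          set dp2 := (pvRec itemsS boxesS (i + 1) (box + 1) (pvRec itemsS boxesS (i + 1) j dp).2).2 with hdp2
          set val := max (pvRec itemsS boxesS (i + 1) j dp).1
            ((pvRec itemsS boxesS (i + 1) (box + 1) (pvRec itemsS boxesS (i + 1) j dp).2).1
              + (itemsS.getD i (0, 0)).2) with hvaldef
          have hval : val = pvF itemsS boxesS i j := by
            rw [pvF, dif_pos h]
            simp only [hscan]
            rw [hvaldef, e1, e2]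
          have hwrite := fun i' j' => pv_get2_set2 dp2 i j val i' j'
            (by rw [s2.1]; exact h.1) (by rw [s2.2 i h.1]; omega)
          refine ⟨?_, ⟨by rw [pv_len_set2, s2.1], fun i' hi' => by rw [pv_row_set2]; exact s2.2 i' hi'⟩, ?_⟩
          · rw [hwrite i j, if_pos ⟨rfl, rfl⟩, hval]
          · intro i' j'
            rw [hwrite i' j']
            split_ifs with hij
            · right; rw [hij.1, hij.2, hval]
            · exact v2 i' j'
    · rw [pvRec, dif_neg h, pvF, dif_neg h]
      exact ⟨rfl, hs, hv⟩

-- ---- itemsS is sorted by weight (insertion sort of sorted2 preserves the lex "not-after" order) ----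

theorem pv_insertBy_pairwise (lt : Int × Int → Int × Int → Bool)
    (hasym : ∀ a b, lt a b = true → lt b a = false)
    (htrans : ∀ a b c, lt a b = true → lt b c = true → lt a c = true)
    (x : Int × Int) (ys : List (Int × Int)) (hys : ys.Pairwise (fun a b => lt b a = false)) :
    (PySem.List.insertBy lt x ys).Pairwise (fun a b => lt b a = false) := by
  induction ys with
  | nil => simp [PySem.List.insertBy]
  | cons y ys ih =>
    rcases List.pairwise_cons.mp hys with ⟨hy, hys'⟩
    by_cases hb : lt x y = true
    · rw [show PySem.List.insertBy lt x (y :: ys) = x :: y :: ys from by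
        simp [PySem.List.insertBy, hb]]
      refine List.pairwise_cons.mpr ⟨?_, hys⟩
      intro z hz
      rcases List.mem_cons.mp hz with hz1 | hz'
      · rw [hz1]; exact hasym x y hb
      · cases h0 : lt z x with
        | false => rfl
        | true => exact absurd (hy z hz') (by simp [htrans z x y h0 hb])
    · have hbf : lt x y = false := Bool.eq_false_iff.mpr hb
      rw [show PySem.List.insertBy lt x (y :: ys) = y :: PySem.List.insertBy lt x ys from by
        simp [PySem.List.insertBy, hb]]
      refine List.pairwise_cons.mpr ⟨?_, ih hys'⟩
      intro z hz
      rcases (PySem.List.mem_insertBy lt x z ys).mp hz with hz1 | hzy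
      · rw [hz1]; exact hbf
      · exact hy z hzy

theorem pv_sorted2_pairwise_fst (xs : List (Int × Int)) :
    (PySem.List.sorted2 xs Prod.fst Prod.snd).Pairwise (fun a b => a.1 ≤ b.1) := by
  have hmain : ∀ (l : List (Int × Int)) (acc : List (Int × Int)),
      acc.Pairwise (fun a b =>
        (decide (b.1 < a.1) || (!decide (a.1 < b.1) && decide (b.2 < a.2))) = false) →
      (l.foldl (fun acc x =>
          PySem.List.insertBy
            (fun a b => decide (a.1 < b.1) || (!decide (b.1 < a.1) && decide (a.2 < b.2)))
            x acc) acc).Pairwise (fun a b =>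
        (decide (b.1 < a.1) || (!decide (a.1 < b.1) && decide (b.2 < a.2))) = false) := by
    intro l
    induction l with
    | nil => intro acc hacc; exact hacc
    | cons x l ih =>
      intro acc hacc
      refine ih _ (pv_insertBy_pairwise _ ?_ ?_ x acc hacc)
      · intro a b h
        simp only [Bool.or_eq_true, decide_eq_true_eq, Bool.and_eq_true,
          Bool.not_eq_eq_eq_not, Bool.not_true, decide_eq_false_iff_not] at h
        simp only [Bool.or_eq_false_iff, decide_eq_false_iff_not, Bool.and_eq_false_iff,
          Bool.not_eq_eq_eq_not, Bool.not_false, decide_eq_true_eq, not_lt]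
        omega
      · intro a b c h1 h2
        simp only [Bool.or_eq_true, decide_eq_true_eq, Bool.and_eq_true,
          Bool.not_eq_eq_eq_not, Bool.not_true, decide_eq_false_iff_not] at h1 h2 ⊢
        omega
  have h := hmain xs [] (List.Pairwise.nil)
  unfold PySem.List.sorted2 at *
  simp only [if_neg (by decide : ¬ (false = true))] at *
  exact h.imp (by
    intro a b hab
    simp only [Bool.or_eq_false_iff, decide_eq_false_iff_not, not_lt] at hab
    exact hab.1)

-- ---- the merge pass computes the counts ----

theorem pv_sorted_getD_lt_iff (w : Int) (l : List Int) (hl : l.Pairwise (· ≤ ·)) (p : Nat)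
    (hp : p < l.length) :
    l.getD p 0 < w ↔ p < l.countP (fun b => decide (b < w)) := by
  induction l generalizing p with
  | nil => simp at hp
  | cons a t ih =>
    rcases List.pairwise_cons.mp hl with ⟨ha, ht⟩
    cases p with
    | zero =>
      simp only [List.getD_cons_zero, List.countP_cons]
      by_cases haw : a < w
      · simp [haw]
      · have hct : t.countP (fun b => decide (b < w)) = 0 := by
          rw [List.countP_eq_zero]
          intro x hx
          simp only [decide_eq_true_eq]
          exact fun hxw => haw (lt_of_le_of_lt (ha x hx) hxw)
        simp [haw, hct]
    | succ p =>
      simp only [List.getD_cons_succ, List.countP_cons]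
      by_cases haw : a < w
      · rw [ih ht p (by simpa using hp)]
        simp [haw]
      · have hct : t.countP (fun b => decide (b < w)) = 0 := by
          rw [List.countP_eq_zero]
          intro x hx
          simp only [decide_eq_true_eq]
          exact fun hxw => haw (lt_of_le_of_lt (ha x hx) hxw)
        have hmem : t.getD p 0 ∈ t := by
          rw [List.getD_eq_getElem?_getD, List.getElem?_eq_getElem (by simpa using hp)]
          exact List.getElem_mem _
        have hge : ¬ t.getD p 0 < w := fun hxw => haw (lt_of_le_of_lt (ha _ hmem) hxw)
        simp only [List.getD_eq_getElem?_getD] at hge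
        simp [haw, hct]
        omega

theorem pvAdvance_eq (boxesS : List Int) (hl : boxesS.Pairwise (· ≤ ·)) (w : Int) :
    ∀ (k p : Nat), boxesS.countP (fun b => decide (b < w)) - p ≤ k →
      p ≤ boxesS.countP (fun b => decide (b < w)) →
      pvAdvance boxesS w p = boxesS.countP (fun b => decide (b < w)) := by
  intro k
  induction k with
  | zero =>
    intro p hk hp
    have hpc : p = boxesS.countP (fun b => decide (b < w)) := by omega
    rw [pvAdvance]
    rw [dif_neg]
    · exact hpc
    · rintro ⟨h1, h2⟩
      exact absurd ((pv_sorted_getD_lt_iff w boxesS hl p h1).mp h2) (by omega)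
  | succ k ih =>
    intro p hk hp
    by_cases hpc : p < boxesS.countP (fun b => decide (b < w))
    · have hplen : p < boxesS.length := by
        have := List.countP_le_length (p := fun b => decide (b < w)) (l := boxesS)
        omega
      rw [pvAdvance, dif_pos ⟨hplen, (pv_sorted_getD_lt_iff w boxesS hl p hplen).mpr hpc⟩]
      exact ih (p + 1) (by omega) (by omega)
    · have hpc' : p = boxesS.countP (fun b => decide (b < w)) := by omega
      rw [pvAdvance, dif_neg]
      · exact hpc'
      · rintro ⟨h1, h2⟩
        exact absurd ((pv_sorted_getD_lt_iff w boxesS hl p h1).mp h2) (by omega)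

theorem pvCs_fold (boxesS : List Int) (hl : boxesS.Pairwise (· ≤ ·)) :
    ∀ (its : List (Int × Int)), its.Pairwise (fun a b => a.1 ≤ b.1) →
      ∀ (p0 : Nat) (acc : List Nat),
        (∀ wv ∈ its, p0 ≤ boxesS.countP (fun b => decide (b < wv.1))) →
        (its.foldl (fun st wv =>
            (pvAdvance boxesS wv.1 st.1, st.2 ++ [pvAdvance boxesS wv.1 st.1])) (p0, acc)).2
          = acc ++ its.map (fun wv => boxesS.countP (fun b => decide (b < wv.1))) := by
  intro its
  induction its with
  | nil => intro _ p0 acc _; simp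
  | cons wv t ih =>
    intro hpw p0 acc hp0
    rcases List.pairwise_cons.mp hpw with ⟨hwv, ht⟩
    have hadv : pvAdvance boxesS wv.1 p0 = boxesS.countP (fun b => decide (b < wv.1)) :=
      pvAdvance_eq boxesS hl wv.1 _ p0 le_rfl (hp0 wv (by simp))
    simp only [List.foldl_cons, hadv]
    rw [ih ht _ _ (fun u hu => by
      have h1 : wv.1 ≤ u.1 := hwv u hu
      exact List.countP_mono_left (fun b _ hb => by
        simp only [decide_eq_true_eq] at hb ⊢; omega))]
    simp

theorem pvCs_eq (itemsS : List (Int × Int)) (boxesS : List Int)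
    (hitems : itemsS.Pairwise (fun a b => a.1 ≤ b.1)) (hl : boxesS.Pairwise (· ≤ ·)) :
    pvCs itemsS boxesS = itemsS.map (fun wv => boxesS.countP (fun b => decide (b < wv.1))) := by
  unfold pvCs
  rw [pvCs_fold boxesS hl itemsS hitems 0 [] (fun _ _ => Nat.zero_le _)]
  simp

-- ---- membership in the forward sets ----

theorem pv_mem_fold_step (m ci : Nat) (J : List Nat) :
    ∀ (acc : List Nat) (y : Nat),
      (y ∈ J.foldl (fun nxt j =>
          if max j ci < m then PySem.Set.add (PySem.Set.add nxt j) (max j ci + 1) else nxt) acc)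
        ↔ (y ∈ acc ∨ ∃ j ∈ J, max j ci < m ∧ (y = j ∨ y = max j ci + 1)) := by
  induction J with
  | nil => simp
  | cons a J ih =>
    intro acc y
    simp only [List.foldl_cons]
    rw [ih]
    split_ifs with h
    · simp only [PySem.Set.mem_add, List.mem_cons]
      constructor
      · rintro (((hy | rfl) | rfl) | ⟨j, hj, hjm, hy⟩)
        · exact Or.inl hy
        · exact Or.inr ⟨y, Or.inl rfl, h, Or.inl rfl⟩
        · exact Or.inr ⟨a, Or.inl rfl, h, Or.inr rfl⟩
        · exact Or.inr ⟨j, Or.inr hj, hjm, hy⟩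
      · rintro (hy | ⟨j, hj, hjm, hy⟩)
        · exact Or.inl (Or.inl (Or.inl hy))
        · rcases hj with rfl | hj
          · rcases hy with rfl | rfl
            · exact Or.inl (Or.inl (Or.inr rfl))
            · exact Or.inl (Or.inr rfl)
          · exact Or.inr ⟨j, hj, hjm, hy⟩
    · simp only [List.mem_cons]
      constructor
      · rintro (hy | ⟨j, hj, hjm, hy⟩)
        · exact Or.inl hy
        · exact Or.inr ⟨j, Or.inr hj, hjm, hy⟩
      · rintro (hy | ⟨j, hj, hjm, hy⟩)
        · exact Or.inl hy
        · rcases hj with rfl | hj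
          · exact absurd hjm h
          · exact Or.inr ⟨j, hj, hjm, hy⟩

theorem pv_mem_stepSet (m ci : Nat) (J : List Nat) (j : Nat) (hj : j ∈ J)
    (hfit : max j ci < m) :
    j ∈ pvStepSet m J ci ∧ (max j ci + 1) ∈ pvStepSet m J ci := by
  unfold pvStepSet
  constructor <;> rw [pv_mem_fold_step] <;> exact Or.inr ⟨j, hj, hfit, by simp⟩

-- ---- dict built by inserting a value that depends only on the key ----

theorem pv_dict_fold_getD_not_mem (val : Nat → Int) (L : List Nat) :
    ∀ (d0 : PySem.Dict Nat Int) (j : Nat), j ∉ L →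
      (L.foldl (fun g jj => g.insert jj (val jj)) d0).getD j 0 = d0.getD j 0 := by
  induction L with
  | nil => intro d0 j _; rfl
  | cons a L ih =>
    intro d0 j hj
    simp only [List.foldl_cons]
    rw [ih _ j (fun h => hj (List.mem_cons_of_mem a h)),
      PySem.Dict.getD_insert, if_neg (fun h => hj (by simp [h]))]

theorem pv_dict_fold_getD (val : Nat → Int) (L : List Nat) :
    ∀ (d0 : PySem.Dict Nat Int) (j : Nat), j ∈ L →
      (L.foldl (fun g jj => g.insert jj (val jj)) d0).getD j 0 = val j := by
  induction L with
  | nil => simp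
  | cons a L ih =>
    intro d0 j hj
    simp only [List.foldl_cons]
    by_cases hjL : j ∈ L
    · exact ih _ j hjL
    · have hja : j = a := by rcases List.mem_cons.mp hj with h | h; exact h; exact absurd h hjL
      rw [pv_dict_fold_getD_not_mem val L _ j hjL, hja, PySem.Dict.getD_insert, if_pos rfl]

-- ---- the backward pass computes pvF on the reachable sets ----

theorem pv_back_main (itemsS : List (Int × Int)) (boxesS : List Int)
    (hsort : boxesS.Pairwise (· ≤ ·)) :
    ∀ (cst : List Nat) (i : Nat), i + cst.length = itemsS.length →
      (∀ t, t < cst.length → cst.getD t 0 =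
        boxesS.countP (fun b => decide (b < (itemsS.getD (i + t) (0, 0)).1))) →
      ∀ (J : List Nat) (j : Nat), j ∈ J →
        ((List.zip (itemsS.drop i) (List.zip cst (pvLevels boxesS.length J cst))).foldr
            (fun t f => pvBackStep boxesS.length f t) PySem.Dict.empty).getD j 0
          = pvF itemsS boxesS i j := by
  intro cst
  induction cst with
  | nil =>
    intro i hi _ J j _
    simp only [List.length_nil] at hi
    simp only [List.zip_nil_left, List.zip_nil_right, List.foldr_nil]
    rw [pvF_of_ge itemsS boxesS i j (by omega)]
    rfl
  | cons ci rest ih =>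
    intro i hi hcs J j hjJ
    have hin : i < itemsS.length := by simp only [List.length_cons] at hi; omega
    rw [List.drop_eq_getElem_cons hin]
    simp only [pvLevels, List.zip_cons_cons, List.foldr_cons]
    have hci : ci = boxesS.countP (fun b => decide (b < itemsS[i].1)) := by
      have := hcs 0 (by simp)
      simpa [List.getD_eq_getElem?_getD, List.getElem?_eq_getElem hin] using this
    -- the inner dict (levels above i) — abbreviate
    set F := (List.zip (itemsS.drop (i + 1))
        (List.zip rest (pvLevels boxesS.length (pvStepSet boxesS.length J ci) rest))).foldr
      (fun t f => pvBackStep boxesS.length f t) PySem.Dict.empty with hF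
    have hIH : ∀ j', j' ∈ pvStepSet boxesS.length J ci →
        F.getD j' 0 = pvF itemsS boxesS (i + 1) j' := by
      intro j' hj'
      exact ih (i + 1) (by simp only [List.length_cons] at hi; omega)
        (fun t ht => by
          have := hcs (t + 1) (by simp only [List.length_cons]; omega)
          simpa [Nat.add_assoc, Nat.add_comm 1 t] using this)
        (pvStepSet boxesS.length J ci) j' hj'
    -- the dict produced at level i
    unfold pvBackStep
    dsimp only
    rw [pv_dict_fold_getD _ _ _ j hjJ]
    have hgetd : itemsS.getD i (0, 0) = itemsS[i] := by
      rw [List.getD_eq_getElem?_getD, List.getElem?_eq_getElem hin]; rfl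
    by_cases hfit : max j ci < boxesS.length
    · rw [if_neg (by omega)]
      obtain ⟨hmem1, hmem2⟩ := pv_mem_stepSet boxesS.length ci J j hjJ hfit
      have hjm : j < boxesS.length := by omega
      conv_rhs => rw [pvF]
      rw [dif_pos ⟨hin, hjm⟩]
      simp only [hgetd]
      rw [pv_scan_sorted itemsS[i].1 boxesS hsort j, ← hci, if_pos hfit]
      rw [hIH j hmem1, hIH _ hmem2]
    · rw [if_pos (by omega)]
      by_cases hjm : j < boxesS.length
      · conv_rhs => rw [pvF]
        rw [dif_pos ⟨hin, hjm⟩]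
        simp only [hgetd]
        rw [pv_scan_sorted itemsS[i].1 boxesS hsort j, ← hci, if_neg hfit]
      · rw [pvF_of_ge itemsS boxesS i j (by omega)]

-- ---- assembling ----

theorem pv_solve_eq (items : List (Int × Int)) (boxes : List Int) (ql qr : Int) :
    solve items boxes ql qr = solve_alt items boxes ql qr := by
  unfold solve solve_alt
  simp only []
  set itemsS := PySem.List.sorted2 items Prod.fst Prod.snd with hitems
  set boxesS := PySem.List.sorted
    (PySem.List.slice boxes none (some (ql - 1)) ++ PySem.List.slice boxes (some qr) none)
    (fun x => x) false with hboxes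
  have hsort : boxesS.Pairwise (· ≤ ·) :=
    PySem.List.sorted_pairwise (xs := PySem.List.slice boxes none (some (ql - 1)) ++
      PySem.List.slice boxes (some qr) none) (key := fun x => x)
  have hpw : itemsS.Pairwise (fun a b => a.1 ≤ b.1) := pv_sorted2_pairwise_fst items
  have hA := (pv_rec_main itemsS boxesS itemsS.length 0 0
    (List.replicate itemsS.length (List.replicate (boxesS.length + 1) (-1)))
    (by omega)
    ⟨List.length_replicate, fun i hi => pv_row_replicate _ _ i hi⟩
    (fun i j => Or.inl (pv_get2_replicate _ _ i j))).1
  have hcseq := pvCs_eq itemsS boxesS hpw hsort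
  have hB := pv_back_main itemsS boxesS hsort (pvCs itemsS boxesS) 0
    (by rw [hcseq]; simp)
    (by
      intro t ht
      rw [hcseq] at ht ⊢
      simp only [List.length_map] at ht
      rw [List.getD_eq_getElem?_getD, List.getElem?_map, List.getElem?_eq_getElem ht]
      simp only [Option.map_some, Option.getD_some, Nat.zero_add]
      rw [List.getD_eq_getElem?_getD, List.getElem?_eq_getElem ht]
      rfl)
    [0] 0 (by simp)
  rw [List.drop_zero] at hB
  rw [hA, ← hB]

-- ===== VERDICT (by name: the statement is the Claim_ definition above) =====
theorem solve_spec : Claim_equal_solve := by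
  intro items boxes ql qr _
  unfold Spec_solve
  exact pv_solve_eq items boxes ql qr
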